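/-
  GENERATED by c/gen_labels.py from the tables of the image toyh (FUNCTIONS LOOPS CHECKS insns sym; the PROGRAM only (the base is in the shared library))
  -- do not edit; re-run the script when the image is rebuilt.

  `Toyh.L.<function>.at_<hex address>`: cut points added by a SPLIT of a proof unit (the `at` lines of --extra). The name is the address: no label is ever renumbered, and Labels.lean does not change.
  Statements and proofs cite these names, never the numbers: a rebuild that only shifts code changes this file alone.
  Per function: entry, size (bytes), insns (instructions), cut<k> (the addresses the units table cites: segment
  entries, exits, cut points), loop<k> (loop heads), ret<k> (the return address of the k-th call), chk<k> (the call
  instruction of the k-th check site). One address may have several names.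
-/
import Toyh.Labels
namespace Toyh.L
open X86

end Toyh.L
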